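-- pv_equiv track=rewrite | github.com/johanamagnusson/AdventOfCode2020 | Day06/main.py | parse_group_two
-- ===== SOURCE A (Python) =====
-- def parse_group_two(group):
--     answeredQuestionsByAll = group[0]
--     for person in group:
--         toBeRemoved = ""
--         for c in answeredQuestionsByAll:
--             if c not in person:
--                 toBeRemoved += c
--         for c in toBeRemoved:
--             answeredQuestionsByAll = answeredQuestionsByAll.replace(c, "")
--     return answeredQuestionsByAll
-- ===== SOURCE B (Python) =====
-- def parse_group_two(group):
--     common = set(group[0])
--     for person in group[1:]:
--         common &= set(person)
--     return ''.join(c for c in group[0] if c in common)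
-- ===== Notes on version B (the rewrite author's own statement) =====
-- stated objective: simpler
-- what changed: B intersects per-person character sets once and then filters group[0] in a single pass, instead of A's per-person removal-string construction with repeated str.replace rescans of the accumulator.
-- outside the precondition, e.g. on parse_group_two([]): A raises IndexError, B raises IndexError
import Mathlib
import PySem

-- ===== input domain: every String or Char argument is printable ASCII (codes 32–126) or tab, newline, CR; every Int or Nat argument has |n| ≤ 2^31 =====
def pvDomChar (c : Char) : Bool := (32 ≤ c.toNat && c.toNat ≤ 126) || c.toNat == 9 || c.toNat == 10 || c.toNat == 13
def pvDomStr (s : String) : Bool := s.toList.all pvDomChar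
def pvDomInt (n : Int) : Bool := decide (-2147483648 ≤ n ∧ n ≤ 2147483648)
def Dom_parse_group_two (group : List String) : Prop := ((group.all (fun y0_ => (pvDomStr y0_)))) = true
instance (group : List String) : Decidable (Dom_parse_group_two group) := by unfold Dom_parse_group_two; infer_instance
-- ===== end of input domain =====

-- B replaces A's per-person removal-string + repeated str.replace rescans by one set-intersection
-- pass and a single filter of group[0] (objective: simpler).
-- ===== PORT A =====
-- one iteration of A's outer loop: build toBeRemoved, then remove its chars with replace
def pgAStep (acc : List Char) (person : String) : List Char :=
  let tbr := acc.foldl (fun t c => if PySem.Chars.isIn [c] person.toList then t else t ++ [c]) []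
  tbr.foldl (fun s c => PySem.Chars.replace s [c] []) acc

def parse_group_two (group : List String) : String :=
  match PySem.List.pyGet? group 0 with
  | none => ""   -- Python raises IndexError here; excluded by Pre_
  | some first => String.ofList (group.foldl pgAStep first.toList)

-- ===== PORT B =====
def parse_group_two_alt (group : List String) : String :=
  match PySem.List.pyGet? group 0 with
  | none => ""   -- Python raises IndexError here; excluded by Pre_
  | some first =>
    let common := (PySem.List.slice group (some 1) none).foldl
      (fun s p => PySem.Set.inter s (PySem.Set.ofList p.toList))
      (PySem.Set.ofList first.toList)
    String.ofList (first.toList.filter (fun c => PySem.Set.contains common c))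

-- ===== PRECONDITION & SPEC =====
-- Pre_ excludes only the empty list, on which both Pythons raise IndexError at group[0].
def Pre_parse_group_two (group : List String) : Prop := group ≠ []
instance (group : List String) : Decidable (Pre_parse_group_two group) := by unfold Pre_parse_group_two; infer_instance
def pvWitness_parse_group_two : List String := ["abcb", "bcd", "cb"]

def Spec_parse_group_two (group : List String) (out : String) : Prop := out = parse_group_two_alt group
instance (group : List String) (out : String) : Decidable (Spec_parse_group_two group out) := by unfold Spec_parse_group_two; infer_instance

-- ===== CLAIM (what is proved, stated in full; the proofs are below) =====
def Claim_equal_parse_group_two : Prop := ∀ (group : List String), Dom_parse_group_two group → Pre_parse_group_two group → Spec_parse_group_two group (parse_group_two group)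

-- ===== LEMMAS AND PROOFS =====
-- str.replace(c, "") deletes every occurrence of the single char c
theorem pg_replace_go (c : Char) : ∀ (fuel : Nat) (l acc : List Char), l.length ≤ fuel →
    PySem.Chars.replace.go [c] [] fuel l acc = acc.reverse ++ l.filter (fun x => x != c) := by
  intro fuel
  induction fuel with
  | zero => intro l acc h; cases l with
      | nil => simp [PySem.Chars.replace.go]
      | cons d t => simp at h
  | succ n ih =>
    intro l acc h
    cases l with
    | nil => simp [PySem.Chars.replace.go]
    | cons d t =>
      rw [PySem.Chars.replace.go]
      by_cases hd : d = c
      · subst hd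
        simp [List.isPrefixOf, List.filter, ih t acc (by simpa using h)]
      · have : [c].isPrefixOf (d :: t) = false := by
          simp [List.isPrefixOf]; exact fun h' => (hd h'.symm).elim
        simp only [this, Bool.false_eq_true, if_false]
        rw [ih t (d :: acc) (by simpa using h)]
        have hb : (d != c) = true := by simp [hd]
        simp [List.filter, hb]

theorem pg_replace_single (cs : List Char) (c : Char) :
    PySem.Chars.replace cs [c] [] = cs.filter (fun x => x != c) := by
  simp [PySem.Chars.replace]
  exact pg_replace_go c cs.length cs [] le_rfl

-- folding single-char removals over a list removes exactly the listed chars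
theorem pg_removeAll (tbr : List Char) : ∀ (acc : List Char),
    tbr.foldl (fun s c => PySem.Chars.replace s [c] []) acc
      = acc.filter (fun x => !(tbr.contains x)) := by
  induction tbr with
  | nil => intro acc; simp
  | cons c t ih =>
    intro acc
    rw [List.foldl_cons, ih, pg_replace_single, List.filter_filter]
    apply List.filter_congr
    intro x _
    by_cases hx : x = c <;> simp [hx]

-- 'c in person' for a single char is list membership
theorem pg_isIn_singleton (c : Char) (s : List Char) :
    PySem.Chars.isIn [c] s = s.contains c := by
  by_cases h : c ∈ s
  · obtain ⟨l1, l2, rfl⟩ := List.append_of_mem h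
    rw [(PySem.Chars.isIn_iff_infix [c] _).2 ⟨l1, l2, by simp⟩]
    simp
  · rw [(PySem.Chars.isIn_eq_false_iff [c] s).2 (fun hi => h (hi.subset (by simp)))]
    simp [h]

-- one outer-loop iteration of A keeps exactly the chars occurring in person
theorem pg_step_eq (acc : List Char) (person : String) :
    pgAStep acc person = acc.filter (fun c => person.toList.contains c) := by
  have hfun : (fun (t : List Char) c => if PySem.Chars.isIn [c] person.toList then t else t ++ [c])
      = (fun t c => if !PySem.Chars.isIn [c] person.toList then t ++ [c] else t) := by
    funext t c; cases h : PySem.Chars.isIn [c] person.toList <;> simp only [h, Bool.not_true, Bool.not_false, if_true, if_false, Bool.false_eq_true]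
  show (let tbr := acc.foldl (fun t c => if PySem.Chars.isIn [c] person.toList then t else t ++ [c]) [];
    tbr.foldl (fun s c => PySem.Chars.replace s [c] []) acc) = _
  simp only [hfun]
  rw [show (List.foldl (fun t c => if (!PySem.Chars.isIn [c] person.toList) = true then t ++ [c] else t) [] acc)
      = List.map id (List.filter (fun c => !PySem.Chars.isIn [c] person.toList) acc) from by
    simpa using PySem.List.foldl_append_if (fun c => !PySem.Chars.isIn [c] person.toList) id acc []]
  rw [List.map_id, pg_removeAll]
  apply List.filter_congr
  intro x hx
  by_cases h : x ∈ person.toList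
  · simp [pg_isIn_singleton, List.mem_filter, h]
  · simp [pg_isIn_singleton, List.mem_filter, hx, h]

-- A's whole outer loop filters by membership in every person
theorem pg_foldA (persons : List String) : ∀ (acc : List Char),
    persons.foldl pgAStep acc
      = acc.filter (fun c => persons.all (fun p => p.toList.contains c)) := by
  induction persons with
  | nil => intro acc; simp
  | cons p t ih =>
    intro acc
    simp only [List.foldl_cons, pg_step_eq, ih, List.filter_filter, List.all_cons]
    apply List.filter_congr
    intro x _
    cases h : p.toList.contains x <;> simp only [h, Bool.and_comm, Bool.true_and, Bool.false_and, Bool.and_true, Bool.and_false]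

-- B's intersection fold: membership in the running set
theorem pg_foldB (persons : List String) : ∀ (s : PySem.Set Char) (c : Char),
    (persons.foldl (fun s p => PySem.Set.inter s (PySem.Set.ofList p.toList)) s).contains c
      = (s.contains c && persons.all (fun p => p.toList.contains c)) := by
  induction persons with
  | nil => intro s c; simp
  | cons p t ih =>
    intro s c
    simp only [List.foldl_cons, ih, List.all_cons]
    have : (PySem.Set.inter s (PySem.Set.ofList p.toList)).contains c
        = (s.contains c && p.toList.contains c) := by
      simp [PySem.Set.inter, PySem.Set.contains, List.mem_filter, PySem.Set.mem_ofList]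
    rw [this, Bool.and_assoc]

-- ===== VERDICT (by name: the statement is the Claim_ definition above) =====
theorem parse_group_two_spec : Claim_equal_parse_group_two := by
  intro group _ hpre
  unfold Spec_parse_group_two
  cases group with
  | nil => exact absurd rfl hpre
  | cons g0 rest =>
    have h0 : PySem.List.pyGet? (g0 :: rest) 0 = some g0 := by simp [pysem]
    simp only [parse_group_two, parse_group_two_alt, h0]
    rw [show PySem.List.slice (g0 :: rest) (some 1) none = rest from by
      simp [pysem]]
    rw [List.foldl_cons, pg_step_eq, pg_foldA]
    congr 1
    rw [List.filter_filter]
    apply List.filter_congr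
    intro c hc
    rw [pg_foldB]
    simp [PySem.Set.contains, PySem.Set.mem_ofList, hc, Bool.and_comm]
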